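-- pv_equiv track=rewrite | github.com/Keeso1/729G28 | projektB/ProjB_g10.py | resolve_conflicts
-- ===== SOURCE A (Python) =====
-- def resolve_conflicts(nestedlist):
--   merged_lsts = []
--   updated_nestedlist = []
--   processed_indices = set()
--
--   for i, lst1 in enumerate(nestedlist):
--     if i in processed_indices:
--       continue
--
--     for j, lst2 in enumerate(nestedlist):
--       merged = False
--       if i != j and (lst1[1] == lst2[1]):
--         merged_booleans = [a or b for a,b in zip(lst1[2:], lst2[2:])]
--         merged_list = lst1[:2] + merged_booleans
--         merged_lsts.append(merged_list)
--         processed_indices.add(i)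
--         processed_indices.add(j)
--         merged = True
--         break
--
--     if not merged:
--       updated_nestedlist.append(lst1)
--
--   updated_nestedlist.extend(merged_lsts)
--   return updated_nestedlist
-- ===== SOURCE B (Python) =====
-- def resolve_conflicts(nestedlist):
--     # Group indices by the key slice lst[1:2] (a slice, so a lone short row is
--     # its own group instead of crashing), then emit in one pass: rows whose key
--     # is unique stay in order; in a key group the first two rows merge with each
--     # other and every later row merges with the group's first row, the same
--     # pairing the original rescan produces.
--     groups = {}
--     for idx, lst in enumerate(nestedlist):
--         groups.setdefault(tuple(lst[1:2]), []).append(idx)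
--     singles = []
--     merged = []
--     for idx, lst in enumerate(nestedlist):
--         g = groups[tuple(lst[1:2])]
--         if len(g) == 1:
--             singles.append(lst)
--         elif idx != g[1]:
--             other = nestedlist[g[1] if idx == g[0] else g[0]]
--             merged.append(lst[:2] + [a or b for a, b in zip(lst[2:], other[2:])])
--     return singles + merged
-- ===== Notes on version B (the rewrite author's own statement) =====
-- stated objective: alternative
-- what changed: Replaces A's per-row rescan of the whole list with a processed-index set by one dict pass grouping row indices by key plus a single emission pass that reads each row's merge partner from its group's first two indices.
import Mathlib
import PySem

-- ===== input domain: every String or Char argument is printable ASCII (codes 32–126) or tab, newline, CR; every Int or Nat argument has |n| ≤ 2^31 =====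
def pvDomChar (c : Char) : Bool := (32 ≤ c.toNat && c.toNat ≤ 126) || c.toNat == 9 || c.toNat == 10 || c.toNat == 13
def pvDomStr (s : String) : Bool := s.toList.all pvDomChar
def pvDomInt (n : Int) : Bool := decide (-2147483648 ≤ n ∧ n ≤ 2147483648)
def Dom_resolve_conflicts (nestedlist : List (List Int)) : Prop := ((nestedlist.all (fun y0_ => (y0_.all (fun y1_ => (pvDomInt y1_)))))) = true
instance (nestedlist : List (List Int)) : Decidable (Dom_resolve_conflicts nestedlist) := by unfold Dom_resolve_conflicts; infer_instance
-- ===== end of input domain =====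

-- B replaces A's per-row rescan of the whole list by a dict that groups row indices by key
-- plus a single emission pass (objective: alternative); A does not mutate its argument.

-- ===== PORT A =====
-- shared row-merge: lst1[:2] + [a or b for a,b in zip(lst1[2:], lst2[2:])]
-- (Python's 'a or b' on ints returns a if a is truthy else b: ported by hand as an if)
def pvMergeRow (l1 l2 : List Int) : List Int :=
  PySem.List.slice l1 none (some 2) ++
    ((PySem.List.slice l1 (some 2) none).zip (PySem.List.slice l2 (some 2) none)).map
      (fun p => if p.1 ≠ 0 then p.1 else p.2)

-- the inner 'for j, lst2 in enumerate(nestedlist): … break' of A: first (j, lst2) with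
-- i != j and lst1[1] == lst2[1] (the loop's appends/adds are done at the call site)
def pvFindA (lst1 : List Int) (i : Int) : List (Int × List Int) → Option (Int × List Int)
  | [] => none
  | (j, lst2) :: rest =>
    if i ≠ j ∧ PySem.List.pyGet? lst1 1 = PySem.List.pyGet? lst2 1 then some (j, lst2)
    else pvFindA lst1 i rest

def resolve_conflicts (nestedlist : List (List Int)) : List (List Int) :=
  let E := PySem.List.enumerate nestedlist
  let st :=
    E.foldl
      (fun (st : List (List Int) × List (List Int) × PySem.Set Int) p =>
        if PySem.Set.contains st.2.2 p.1 then st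
        else
          match pvFindA p.2 p.1 E with
          | some jl =>
              (st.1 ++ [pvMergeRow p.2 jl.2], st.2.1,
               PySem.Set.add (PySem.Set.add st.2.2 p.1) jl.1)
          | none => (st.1, st.2.1 ++ [p.2], st.2.2))
      ([], [], PySem.Set.empty)
  st.2.1 ++ st.1

-- ===== PORT B =====
-- key of a row: tuple(lst[1:2])
def pvKeyB (l : List Int) : List Int := PySem.List.slice l (some 1) (some 2)

def resolve_conflicts_alt (nestedlist : List (List Int)) : List (List Int) :=
  let E := PySem.List.enumerate nestedlist
  let groups : PySem.Dict (List Int) (List Int) :=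
    E.foldl (fun d p => d.modify (pvKeyB p.2) [] (· ++ [p.1])) PySem.Dict.empty
  let st :=
    E.foldl
      (fun (st : List (List Int) × List (List Int)) p =>
        let g := groups.getD (pvKeyB p.2) []
        if g.length = 1 then (st.1 ++ [p.2], st.2)
        else if p.1 ≠ PySem.List.pyGetD g 1 0 then
          let other := PySem.List.pyGetD nestedlist
            (if p.1 = PySem.List.pyGetD g 0 0 then PySem.List.pyGetD g 1 0
             else PySem.List.pyGetD g 0 0) []
          (st.1, st.2 ++ [pvMergeRow p.2 other])
        else st)
      ([], [])
  st.1 ++ st.2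

-- ===== PRECONDITION & SPEC =====
-- Pre_ excludes exactly the inputs where A raises IndexError: with two or more rows every
-- row's lst[1] is read, so all rows need length >= 2; with at most one row nothing is indexed.
def Pre_resolve_conflicts (nestedlist : List (List Int)) : Prop :=
  nestedlist.length ≤ 1 ∨ ∀ l ∈ nestedlist, 2 ≤ l.length
instance (nestedlist : List (List Int)) : Decidable (Pre_resolve_conflicts nestedlist) := by
  unfold Pre_resolve_conflicts; infer_instance

def pvWitness_resolve_conflicts : List (List Int) :=
  [[1, 7, 0, 1], [2, 8, 1, 0], [3, 7, 1, 1], [4, 7, 0, 0]]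

def Spec_resolve_conflicts (nestedlist : List (List Int)) (out : List (List Int)) : Prop := out = resolve_conflicts_alt nestedlist
instance (nestedlist : List (List Int)) (out : List (List Int)) : Decidable (Spec_resolve_conflicts nestedlist out) := by unfold Spec_resolve_conflicts; infer_instance

-- ===== CLAIM (what is proved, stated in full; the proofs are below) =====
def Claim_equal_resolve_conflicts : Prop := ∀ (nestedlist : List (List Int)), Dom_resolve_conflicts nestedlist → Pre_resolve_conflicts nestedlist → Spec_resolve_conflicts nestedlist (resolve_conflicts nestedlist)

-- ===== LEMMAS AND PROOFS =====
-- Shared reference description: pvUpd nl n lists the rows whose key is unique, pvMrg nl n the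
-- merged rows, both in index order; each side's loop is proved equal to pvUpd ++ pvMrg.

def pvRow (nl : List (List Int)) (j : Int) : List Int := PySem.List.pyGetD nl j []
def pvK (nl : List (List Int)) (j : Int) : Int := PySem.List.pyGetD (pvRow nl j) 1 0
def pvGa (nl : List (List Int)) (i : Int) : List Int :=
  (PySem.List.pyRange 0 (PySem.List.len nl) 1).filter (fun j => decide (pvK nl j = pvK nl i))
def pvOthers (nl : List (List Int)) (i : Int) : List Int :=
  (PySem.List.pyRange 0 (PySem.List.len nl) 1).filter (fun j => decide (i ≠ j ∧ pvK nl i = pvK nl j))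
-- Bool so the `if pvSkip … then` in pvMrg needs no extra Decidable instance
def pvSkip (nl : List (List Int)) (i : Int) : Bool := (pvGa nl i)[1]? == some i
def pvUpd (nl : List (List Int)) (m : Int) : List (List Int) :=
  ((PySem.List.pyRange 0 m 1).filter (fun i => (pvOthers nl i).isEmpty)).map (pvRow nl)
def pvMrg (nl : List (List Int)) (m : Int) : List (List Int) :=
  (PySem.List.pyRange 0 m 1).filterMap
    (fun i => if pvSkip nl i then none
              else ((pvOthers nl i).head?).map (fun j => pvMergeRow (pvRow nl i) (pvRow nl j)))

lemma others_eq (nl : List (List Int)) (i : Int) :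
    pvOthers nl i = (pvGa nl i).filter (fun j => decide (j ≠ i)) := by
  unfold pvOthers pvGa
  rw [List.filter_filter]
  apply List.filter_congr
  intro j _
  rw [← Bool.decide_and]
  apply decide_eq_decide.mpr
  constructor
  · rintro ⟨a, b⟩; exact ⟨a.symm, b.symm⟩
  · rintro ⟨a, b⟩; exact ⟨a.symm, b.symm⟩

lemma ga_nodup (nl : List (List Int)) (i : Int) : (pvGa nl i).Nodup :=
  (PySem.List.nodup_pyRange_one 0 (PySem.List.len nl)).filter _

lemma ga_sorted (nl : List (List Int)) (i : Int) : (pvGa nl i).Pairwise (· < ·) :=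
  (PySem.List.pairwise_lt_pyRange_one 0 (PySem.List.len nl)).filter _

lemma mem_ga (nl : List (List Int)) (i j : Int) :
    j ∈ pvGa nl i ↔ (0 ≤ j ∧ j < nl.length ∧ pvK nl j = pvK nl i) := by
  unfold pvGa
  simp [List.mem_filter, PySem.List.mem_pyRange_one, PySem.List.len_eq, and_assoc]

lemma mem_ga_self (nl : List (List Int)) (i : Int) (h0 : 0 ≤ i) (h1 : i < nl.length) :
    i ∈ pvGa nl i := (mem_ga nl i i).mpr ⟨h0, h1, rfl⟩

lemma upd_succ (nl : List (List Int)) (m : Int) (h : 0 ≤ m) :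
    pvUpd nl (m + 1) = pvUpd nl m ++ (if (pvOthers nl m).isEmpty then [pvRow nl m] else []) := by
  unfold pvUpd
  rw [PySem.List.pyRange_one_succ_right h, List.filter_append, List.map_append]
  by_cases hc : (pvOthers nl m).isEmpty <;> simp [hc]

lemma mrg_succ (nl : List (List Int)) (m : Int) (h : 0 ≤ m) :
    pvMrg nl (m + 1) = pvMrg nl m ++
      (if pvSkip nl m then none
       else ((pvOthers nl m).head?).map (fun j => pvMergeRow (pvRow nl m) (pvRow nl j))).toList := by
  unfold pvMrg
  rw [PySem.List.pyRange_one_succ_right h, List.filterMap_append]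
  simp only [List.filterMap]
  cases hx : (if pvSkip nl m then none
       else ((pvOthers nl m).head?).map (fun j => pvMergeRow (pvRow nl m) (pvRow nl j))) <;>
    simp

lemma keyB_eq (l : List Int) (h : 2 ≤ l.length) :
    pvKeyB l = [PySem.List.pyGetD l 1 0] := by
  match l, h with
  | x :: y :: t, _ => simp [pvKeyB, pysem]

lemma row_len (nl : List (List Int)) (H2 : ∀ l ∈ nl, 2 ≤ l.length) (j : Int)
    (h0 : 0 ≤ j) (h1 : j < nl.length) : 2 ≤ (pvRow nl j).length := by
  apply H2
  apply PySem.List.pyGetD_mem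
  constructor <;> omega

lemma gb_eq_ga (nl : List (List Int)) (H2 : ∀ l ∈ nl, 2 ≤ l.length) (i : Int)
    (h0 : 0 ≤ i) (h1 : i < nl.length) :
    (PySem.List.pyRange 0 (PySem.List.len nl) 1).filter
        (fun j => pvKeyB (pvRow nl j) == pvKeyB (pvRow nl i)) = pvGa nl i := by
  unfold pvGa
  apply List.filter_congr
  intro j hj
  rw [PySem.List.mem_pyRange_one] at hj
  rw [PySem.List.len_eq] at hj
  rw [keyB_eq _ (row_len nl H2 j hj.1 (by exact_mod_cast hj.2)),
      keyB_eq _ (row_len nl H2 i h0 h1)]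
  show ([pvK nl j] == [pvK nl i]) = decide (pvK nl j = pvK nl i)
  by_cases h : pvK nl j = pvK nl i <;> simp [h]

def pvStepB (nl : List (List Int)) (st : List (List Int) × List (List Int)) (i : Int) :
    List (List Int) × List (List Int) :=
  let g := (PySem.List.pyRange 0 (PySem.List.len nl) 1).filter
    (fun j => pvKeyB (PySem.List.pyGetD nl j []) == pvKeyB (PySem.List.pyGetD nl i []))
  if g.length = 1 then (st.1 ++ [PySem.List.pyGetD nl i []], st.2)
  else if i ≠ PySem.List.pyGetD g 1 0 then
    (st.1, st.2 ++ [pvMergeRow (PySem.List.pyGetD nl i [])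
      (PySem.List.pyGetD nl
        (if i = PySem.List.pyGetD g 0 0 then PySem.List.pyGetD g 1 0
         else PySem.List.pyGetD g 0 0) [])])
  else st

lemma B_loop (nl : List (List Int)) (H2 : ∀ l ∈ nl, 2 ≤ l.length) (k : Nat) (hk : k ≤ nl.length) :
    (PySem.List.pyRange 0 (k : Int) 1).foldl (pvStepB nl) ([], []) = (pvUpd nl k, pvMrg nl k) := by
  induction k with
  | zero => simp [pvUpd, pvMrg, PySem.List.pyRange_one_eq_nil]
  | succ k ih =>
    have hk' : k ≤ nl.length := Nat.le_of_succ_le hk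
    have hcast : ((k + 1 : Nat) : Int) = (k : Int) + 1 := by push_cast; ring
    rw [hcast, PySem.List.pyRange_one_succ_right (by positivity), List.foldl_append, ih hk']
    have h0 : (0 : Int) ≤ (k : Int) := by positivity
    have h1 : (k : Int) < nl.length := by exact_mod_cast hk
    rw [upd_succ nl _ h0, mrg_succ nl _ h0]
    show pvStepB nl (pvUpd nl k, pvMrg nl k) (k : Int) = _
    unfold pvStepB
    rw [show (PySem.List.pyRange 0 (PySem.List.len nl) 1).filter
      (fun j => pvKeyB (PySem.List.pyGetD nl j []) == pvKeyB (PySem.List.pyGetD nl (k:Int) [])) = pvGa nl (k:Int) from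
      gb_eq_ga nl H2 (k:Int) h0 h1]
    have hmem : (k : Int) ∈ pvGa nl (k:Int) := mem_ga_self nl _ h0 h1
    have hnd := ga_nodup nl (k : Int)
    rw [others_eq]
    rcases hga : pvGa nl (k:Int) with _ | ⟨a, _ | ⟨b, tl2⟩⟩
    · rw [hga] at hmem; simp at hmem
    · -- singleton group: a = k
      rw [hga] at hmem; simp at hmem
      subst hmem
      simp [pvSkip, hga, List.filter, pvRow, List.getD]
    · rw [hga] at hmem hnd
      have hab : a ≠ b := by simp at hnd; tauto
      have hb1 : PySem.List.pyGetD (a :: b :: tl2) 1 0 = b := by simp [pysem]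
      have hb0 : PySem.List.pyGetD (a :: b :: tl2) 0 0 = a := by simp [pysem]
      have hlen : ¬ ((a :: b :: tl2).length = 1) := by simp
      dsimp only
      by_cases hib : (k : Int) = b
      · -- k is the second index of its key group: both sides leave the state unchanged
        have hskip : pvSkip nl (k:Int) := by unfold pvSkip; rw [hga, hib]; simp
        have hai : ¬ (a = (k:Int)) := fun h => hab (h.trans hib)
        rw [if_neg hlen, hb1, if_neg (by omega)]
        have hoth : (a :: b :: tl2).filter (fun j => decide (j ≠ (k:Int))) =
            a :: (b :: tl2).filter (fun j => decide (j ≠ (k:Int))) := by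
          simp [List.filter_cons, hai]
        rw [hoth]
        simp [hskip]
      · have hskip : ¬ pvSkip nl (k:Int) := by
          unfold pvSkip; rw [hga]; simp; omega
        rw [if_neg hlen, hb1, if_pos (by omega), hb0]
        by_cases hia : (k : Int) = a
        · -- k is the first index of its group: its partner is the second, b
          have hbk : ¬ (b = (k:Int)) := fun h => hib h.symm
          have hoth : (a :: b :: tl2).filter (fun j => decide (j ≠ (k:Int))) =
              b :: tl2.filter (fun j => decide (j ≠ (k:Int))) := by
            simp [hia.symm, hbk]
          rw [if_pos hia, hoth]
          simp [hskip, pvRow, pvMergeRow]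
        · -- k is a later index: its partner is the group's first, a
          have hak : ¬ (a = (k:Int)) := fun h => hia h.symm
          have hoth : (a :: b :: tl2).filter (fun j => decide (j ≠ (k:Int))) =
              a :: (b :: tl2).filter (fun j => decide (j ≠ (k:Int))) := by
            simp [List.filter_cons, hak]
          rw [if_neg hia, hoth]
          simp [hskip, pvRow, pvMergeRow]

lemma groups_getD (nl : List (List Int)) (c : List Int) :
    ((PySem.List.enumerate nl).foldl
        (fun (d : PySem.Dict (List Int) (List Int)) p => d.modify (pvKeyB p.2) [] (· ++ [p.1]))
        PySem.Dict.empty).getD c []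
      = (PySem.List.pyRange 0 (PySem.List.len nl) 1).filter (fun j => pvKeyB (pvRow nl j) == c) := by
  rw [PySem.List.enumerate_eq_map_pyRange nl ([] : List Int)]
  rw [List.foldl_map]
  have key := PySem.Dict.getD_foldl_modify_append
    ((PySem.List.pyRange 0 (PySem.List.len nl)).map (fun j => (pvKeyB (pvRow nl j), j)))
    PySem.Dict.empty c
  rw [List.foldl_map] at key
  simp only [pvRow] at key ⊢
  rw [key]
  simp [List.filter_map, Function.comp_def]

def pvStepA (nl : List (List Int))
    (st : List (List Int) × List (List Int) × PySem.Set Int) (i : Int) :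
    List (List Int) × List (List Int) × PySem.Set Int :=
  if PySem.Set.contains st.2.2 i then st
  else
    match pvFindA (PySem.List.pyGetD nl i []) i
        ((PySem.List.pyRange 0 (PySem.List.len nl) 1).map (fun j => (j, PySem.List.pyGetD nl j []))) with
    | some jl =>
        (st.1 ++ [pvMergeRow (PySem.List.pyGetD nl i []) jl.2], st.2.1,
         PySem.Set.add (PySem.Set.add st.2.2 i) jl.1)
    | none => (st.1, st.2.1 ++ [PySem.List.pyGetD nl i []], st.2.2)

lemma pvGet1 (l : List Int) (h : 2 ≤ l.length) :
    PySem.List.pyGet? l 1 = some (PySem.List.pyGetD l 1 0) := by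
  match l, h with
  | x :: y :: t, _ => simp [pysem]

lemma findA_eq (nl : List (List Int)) (H2 : ∀ l ∈ nl, 2 ≤ l.length) (i : Int)
    (h0 : 0 ≤ i) (h1 : i < nl.length) (js : List Int)
    (hjs : ∀ j ∈ js, 0 ≤ j ∧ j < nl.length) :
    pvFindA (pvRow nl i) i (js.map (fun j => (j, pvRow nl j))) =
      ((js.filter (fun j => decide (i ≠ j ∧ pvK nl i = pvK nl j))).head?).map
        (fun j => (j, pvRow nl j)) := by
  induction js with
  | nil => rfl
  | cons j t ih =>
    have hj := hjs j (List.mem_cons_self ..)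
    have hcond : (i ≠ j ∧ PySem.List.pyGet? (pvRow nl i) 1 = PySem.List.pyGet? (pvRow nl j) 1)
        ↔ (i ≠ j ∧ pvK nl i = pvK nl j) := by
      rw [pvGet1 _ (row_len nl H2 i h0 h1), pvGet1 _ (row_len nl H2 j hj.1 hj.2)]
      simp [pvK]
    simp only [List.map_cons, pvFindA, List.filter_cons]
    by_cases hc : i ≠ j ∧ pvK nl i = pvK nl j
    · rw [if_pos (hcond.mpr hc)]
      simp [hc]
    · rw [if_neg (fun h => hc (hcond.mp h))]
      simp only [decide_eq_true_eq] at *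
      rw [if_neg (by simpa using hc)]
      exact ih (fun j hj => hjs j (List.mem_cons_of_mem _ hj))

lemma findA_full (nl : List (List Int)) (H2 : ∀ l ∈ nl, 2 ≤ l.length) (i : Int)
    (h0 : 0 ≤ i) (h1 : i < nl.length) :
    pvFindA (PySem.List.pyGetD nl i []) i
        ((PySem.List.pyRange 0 (PySem.List.len nl) 1).map (fun j => (j, PySem.List.pyGetD nl j []))) =
      ((pvOthers nl i).head?).map (fun j => (j, pvRow nl j)) := by
  have := findA_eq nl H2 i h0 h1 (PySem.List.pyRange 0 (PySem.List.len nl) 1)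
    (by intro j hj
        rw [PySem.List.mem_pyRange_one, PySem.List.len_eq] at hj
        exact ⟨hj.1, by exact_mod_cast hj.2⟩)
  simpa [pvRow, pvOthers] using this

lemma ga_eq_of_key (nl : List (List Int)) {t s : Int} (h : pvK nl t = pvK nl s) :
    pvGa nl t = pvGa nl s := by
  unfold pvGa; simp only [h]

lemma mem_others (nl : List (List Int)) (i j : Int) :
    j ∈ pvOthers nl i ↔ 0 ≤ j ∧ j < nl.length ∧ i ≠ j ∧ pvK nl i = pvK nl j := by
  unfold pvOthers
  simp [List.mem_filter, PySem.List.mem_pyRange_one, PySem.List.len_eq, and_assoc]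

lemma skip_shape (nl : List (List Int)) (t : Int) (h : pvSkip nl t) :
    ∃ a tl, pvGa nl t = a :: t :: tl := by
  unfold pvSkip at h
  rcases hga : pvGa nl t with _ | ⟨a, _ | ⟨b, tl⟩⟩ <;> rw [hga] at h <;> simp at h
  subst h; exact ⟨a, tl, rfl⟩

lemma second_of_first (nl : List (List Int)) (t k : Int) (ht : t ≠ k) (hskip : pvSkip nl t)
    (hhead : (pvGa nl t).head? = some k) :
    (pvOthers nl k).head? = some t ∧ (pvGa nl k)[1]? = some t := by
  obtain ⟨a, tl, hga⟩ := skip_shape nl t hskip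
  rw [hga] at hhead
  simp at hhead
  rw [hhead] at hga
  have hkk : pvK nl k = pvK nl t := by
    have : k ∈ pvGa nl t := by rw [hga]; exact List.mem_cons_self ..
    exact (mem_ga nl t k).mp this |>.2.2
  have hgak : pvGa nl k = k :: t :: tl := by
    rw [ga_eq_of_key nl hkk.symm] at hga; exact hga
  constructor
  · rw [others_eq, hgak]
    simp [ht]
  · rw [hgak]; rfl

lemma skip_k_facts (nl : List (List Int)) (kk : Int) (hs : pvSkip nl kk) :
    ∃ a, (pvGa nl kk).head? = some a ∧ a < kk ∧ (pvOthers nl kk).head? = some a := by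
  obtain ⟨a, tl, hga⟩ := skip_shape nl kk hs
  have hnd := ga_nodup nl kk; rw [hga] at hnd
  have hsort := ga_sorted nl kk; rw [hga] at hsort
  have hak : a ≠ kk := by simp at hnd; tauto
  have halt : a < kk := (List.pairwise_cons.mp hsort).1 kk (List.mem_cons_self ..)
  refine ⟨a, by rw [hga]; rfl, halt, ?_⟩
  rw [others_eq, hga]
  simp [hak]

lemma partner_prop (nl : List (List Int)) (kk : Int) (h0 : 0 ≤ kk) (h1 : kk < nl.length)
    (b : Int) (hb : (pvOthers nl kk).head? = some b) :
    b < kk ∨ (pvSkip nl b ∧ (pvGa nl b).head? = some kk) := by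
  have hmem := mem_ga_self nl kk h0 h1
  rw [others_eq] at hb
  rcases hga : pvGa nl kk with _ | ⟨a, tl⟩
  · rw [hga] at hb; simp at hb
  · rw [hga] at hb hmem
    have hnd := ga_nodup nl kk; rw [hga] at hnd
    have hsort := ga_sorted nl kk; rw [hga] at hsort
    by_cases hak : a = kk
    · subst hak
      have hnotin : ∀ x ∈ tl, ¬ (x = a) := by
        intro x hx h; subst h; simp at hnd; tauto
      rw [List.filter_cons_of_neg (by simp)] at hb
      rw [List.filter_eq_self.mpr (by intro x hx; simpa using hnotin x hx)] at hb
      rcases htl : tl with _ | ⟨c, tl2⟩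
      · rw [htl] at hb; simp at hb
      · rw [htl] at hb; simp at hb
        subst hb
        right
        have hbmem : c ∈ pvGa nl a := by rw [hga, htl]; simp
        have hkb : pvK nl c = pvK nl a := ((mem_ga nl a c).mp hbmem).2.2
        have hgab : pvGa nl c = a :: c :: tl2 := by
          rw [ga_eq_of_key nl hkb, hga, htl]
        constructor
        · unfold pvSkip; rw [hgab]; simp
        · rw [hgab]; rfl
    · left
      have hktl : kk ∈ tl := by
        rcases List.mem_cons.mp hmem with h | h
        · exact absurd h.symm hak
        · exact h
      have halt : a < kk := (List.pairwise_cons.mp hsort).1 kk hktl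
      have hba : b = a := by
        rw [List.filter_cons_of_pos (by simpa using hak)] at hb
        simp at hb; omega
      omega

def pvP (nl : List (List Int)) (m t : Int) : Prop :=
  0 ≤ t ∧ t < nl.length ∧ pvOthers nl t ≠ [] ∧
    (t < m ∨ (pvSkip nl t ∧ ∃ a, (pvGa nl t).head? = some a ∧ a < m))

lemma ga_head_nonneg (nl : List (List Int)) (t a : Int) (h : (pvGa nl t).head? = some a) :
    0 ≤ a :=
  ((mem_ga nl t a).mp (List.mem_of_mem_head? h)).1

lemma ne_nil_of_head? {α : Type} (l : List α) (a : α) (h : l.head? = some a) : l ≠ [] := by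
  intro hn; rw [hn] at h; simp at h

lemma A_loop (nl : List (List Int)) (H2 : ∀ l ∈ nl, 2 ≤ l.length) (k : Nat)
    (hk : k ≤ nl.length) :
    ∃ P : PySem.Set Int,
      (PySem.List.pyRange 0 (k : Int) 1).foldl (pvStepA nl) ([], [], PySem.Set.empty) =
        (pvMrg nl k, pvUpd nl k, P) ∧ ∀ t : Int, t ∈ P ↔ pvP nl k t := by
  induction k with
  | zero =>
    refine ⟨PySem.Set.empty, by simp [pvUpd, pvMrg, PySem.List.pyRange_one_eq_nil], ?_⟩
    intro t
    simp only [PySem.Set.empty, List.not_mem_nil, false_iff]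
    rintro ⟨h0, h1, hne, hc | ⟨hs, a, hha, ha⟩⟩
    · omega
    · have := ga_head_nonneg nl t a hha; omega
  | succ k ih =>
    have hk' : k ≤ nl.length := Nat.le_of_succ_le hk
    obtain ⟨P, hfold, hP⟩ := ih hk'
    have h0 : (0 : Int) ≤ (k : Int) := by positivity
    have h1 : (k : Int) < nl.length := by exact_mod_cast hk
    have hcast : ((k + 1 : Nat) : Int) = (k : Int) + 1 := by push_cast; ring
    rw [hcast, PySem.List.pyRange_one_succ_right (by positivity), List.foldl_append, hfold,
      upd_succ nl _ h0, mrg_succ nl _ h0]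
    simp only [List.foldl_cons, List.foldl_nil]
    unfold pvStepA
    have hcont : PySem.Set.contains P (k : Int) = true ↔ pvSkip nl (k : Int) := by
      rw [PySem.Set.contains_iff, hP]
      constructor
      · rintro ⟨_, _, _, hlt | ⟨hs, _⟩⟩
        · omega
        · exact hs
      · intro hs
        obtain ⟨a, hha, halt, hho⟩ := skip_k_facts nl _ hs
        exact ⟨h0, h1, ne_nil_of_head? _ a hho,
          Or.inr ⟨hs, a, hha, halt⟩⟩
    by_cases hsk : pvSkip nl (k : Int)
    · -- A skips index k: the state is unchanged
      rw [if_pos (hcont.mpr hsk)]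
      obtain ⟨a, hha, halt, hho⟩ := skip_k_facts nl _ hsk
      have hne : ¬ (pvOthers nl (k:Int)).isEmpty := by
        rw [List.isEmpty_iff]
        exact ne_nil_of_head? _ a hho
      refine ⟨P, by simp [hne, hsk], ?_⟩
      intro t
      rw [hP]
      unfold pvP
      constructor
      · rintro ⟨t0, t1, tne, hc | ⟨hs, a', hha', ha'⟩⟩
        · exact ⟨t0, t1, tne, Or.inl (by omega)⟩
        · exact ⟨t0, t1, tne, Or.inr ⟨hs, a', hha', by omega⟩⟩
      · rintro ⟨t0, t1, tne, hc | ⟨hs, a', hha', ha'⟩⟩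
        · by_cases htk : t = (k : Int)
          · subst htk
            exact ⟨t0, t1, tne, Or.inr ⟨hsk, a, hha, halt⟩⟩
          · exact ⟨t0, t1, tne, Or.inl (by omega)⟩
        · by_cases htk : t = (k : Int)
          · subst htk
            exact ⟨t0, t1, tne, Or.inr ⟨hsk, a, hha, halt⟩⟩
          · by_cases hak : a' = (k : Int)
            · rw [hak] at hha'
              obtain ⟨-, hsec⟩ := second_of_first nl t (k:Int) htk hs hha'
              unfold pvSkip at hsk
              rw [hsec] at hsk
              simp at hsk
              exact absurd hsk htk
            · exact ⟨t0, t1, tne, Or.inr ⟨hs, a', hha', by omega⟩⟩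
    · rw [if_neg (fun h => hsk (hcont.mp h))]
      rw [findA_full nl H2 (k : Int) h0 h1]
      rcases hho : (pvOthers nl (k:Int)).head? with _ | b
      · -- no partner: row k is kept verbatim
        have hemp : pvOthers nl (k:Int) = [] := List.head?_eq_none_iff.mp hho
        have hne : (pvOthers nl (k:Int)).isEmpty := by simp [hemp]
        refine ⟨P, by simp [hne, hsk, pvRow], ?_⟩
        intro t
        rw [hP]
        unfold pvP
        constructor
        · rintro ⟨t0, t1, tne, hc | ⟨hs, a', hha', ha'⟩⟩
          · exact ⟨t0, t1, tne, Or.inl (by omega)⟩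
          · exact ⟨t0, t1, tne, Or.inr ⟨hs, a', hha', by omega⟩⟩
        · rintro ⟨t0, t1, tne, hc | ⟨hs, a', hha', ha'⟩⟩
          · by_cases htk : t = (k : Int)
            · subst htk; exact absurd hemp tne
            · exact ⟨t0, t1, tne, Or.inl (by omega)⟩
          · by_cases htk : t = (k : Int)
            · subst htk; exact absurd hemp tne
            · by_cases hak : a' = (k : Int)
              · rw [hak] at hha'
                obtain ⟨hsec, -⟩ := second_of_first nl t (k:Int) htk hs hha'
                rw [hho] at hsec; simp at hsec
              · exact ⟨t0, t1, tne, Or.inr ⟨hs, a', hha', by omega⟩⟩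
      · -- partner b: merge row k with row b, mark both processed
        have hbmem : b ∈ pvOthers nl (k:Int) := List.mem_of_mem_head? (by rw [hho]; rfl)
        obtain ⟨b0, b1, hkb, hKb⟩ := (mem_others nl (k:Int) b).mp hbmem
        have hne : ¬ (pvOthers nl (k:Int)).isEmpty := by
          rw [List.isEmpty_iff]; exact ne_nil_of_head? _ b hho
        refine ⟨(PySem.Set.add P (k:Int)).add b, by simp [hne, hsk, pvRow], ?_⟩
        intro t
        rw [PySem.Set.mem_add, PySem.Set.mem_add, hP]
        unfold pvP
        constructor
        · rintro ((hPt | rfl) | htb)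
          · rcases hPt with ⟨t0, t1, tne, hc | ⟨hs, a', hha', ha'⟩⟩
            · exact ⟨t0, t1, tne, Or.inl (by omega)⟩
            · exact ⟨t0, t1, tne, Or.inr ⟨hs, a', hha', by omega⟩⟩
          · exact ⟨h0, h1, (fun h => hne (by simp [h])), Or.inl (by omega)⟩
          · subst htb
            refine ⟨b0, b1, ?_, ?_⟩
            · exact List.ne_nil_of_mem
                ((mem_others nl t (k:Int)).mpr ⟨h0, h1, fun h => hkb h.symm, hKb.symm⟩)
            · rcases partner_prop nl (k:Int) h0 h1 t hho with hlt | ⟨hsb, hhb⟩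
              · exact Or.inl (by omega)
              · exact Or.inr ⟨hsb, (k:Int), hhb, by omega⟩
        · rintro ⟨t0, t1, tne, hc | ⟨hs, a', hha', ha'⟩⟩
          · by_cases htk : t = (k : Int)
            · exact Or.inl (Or.inr htk)
            · exact Or.inl (Or.inl ⟨t0, t1, tne, Or.inl (by omega)⟩)
          · by_cases htk : t = (k : Int)
            · exact Or.inl (Or.inr htk)
            · by_cases hak : a' = (k : Int)
              · rw [hak] at hha'
                obtain ⟨hsec, -⟩ := second_of_first nl t (k:Int) htk hs hha'
                rw [hho] at hsec
                simp at hsec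
                exact Or.inr hsec.symm
              · exact Or.inl (Or.inl ⟨t0, t1, tne, Or.inr ⟨hs, a', hha', by omega⟩⟩)

theorem resolve_conflicts_B_eq (nl : List (List Int)) (H2 : ∀ l ∈ nl, 2 ≤ l.length) :
    resolve_conflicts_alt nl = pvUpd nl nl.length ++ pvMrg nl nl.length := by
  unfold resolve_conflicts_alt
  simp only [groups_getD]
  rw [PySem.List.enumerate_eq_map_pyRange nl ([] : List Int), List.foldl_map]
  have : (PySem.List.pyRange 0 (PySem.List.len nl) 1).foldl (pvStepB nl) ([], []) =
      (pvUpd nl nl.length, pvMrg nl nl.length) := by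
    rw [PySem.List.len_eq]
    exact B_loop nl H2 nl.length le_rfl
  rw [show (fun (st : List (List Int) × List (List Int)) (j : Int) =>
      (fun st (p : Int × List Int) =>
        let g := (PySem.List.pyRange 0 (PySem.List.len nl) 1).filter
          (fun j => pvKeyB (pvRow nl j) == pvKeyB p.2)
        if g.length = 1 then (st.1 ++ [p.2], st.2)
        else if p.1 ≠ PySem.List.pyGetD g 1 0 then
          (st.1, st.2 ++ [pvMergeRow p.2 (PySem.List.pyGetD nl
            (if p.1 = PySem.List.pyGetD g 0 0 then PySem.List.pyGetD g 1 0
             else PySem.List.pyGetD g 0 0) [])])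
        else st) st ((j, PySem.List.pyGetD nl j []))) = pvStepB nl from rfl]
  rw [this]

theorem resolve_conflicts_A_eq (nl : List (List Int)) (H2 : ∀ l ∈ nl, 2 ≤ l.length) :
    resolve_conflicts nl = pvUpd nl nl.length ++ pvMrg nl nl.length := by
  unfold resolve_conflicts
  dsimp only
  rw [PySem.List.enumerate_eq_map_pyRange nl ([] : List Int), List.foldl_map]
  rw [show (fun (st : List (List Int) × List (List Int) × PySem.Set Int) (j : Int) =>
      (fun st (p : Int × List Int) =>
        if PySem.Set.contains st.2.2 p.1 then st
        else
          match pvFindA p.2 p.1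
              ((PySem.List.pyRange 0 (PySem.List.len nl) 1).map
                (fun j => (j, PySem.List.pyGetD nl j []))) with
          | some jl =>
              (st.1 ++ [pvMergeRow p.2 jl.2], st.2.1,
               PySem.Set.add (PySem.Set.add st.2.2 p.1) jl.1)
          | none => (st.1, st.2.1 ++ [p.2], st.2.2)) st ((j, PySem.List.pyGetD nl j [])))
    = pvStepA nl from rfl]
  obtain ⟨P, hfold, -⟩ := A_loop nl H2 nl.length le_rfl
  rw [PySem.List.len_eq]
  rw [hfold]

theorem resolve_conflicts_single (l : List Int) :
    resolve_conflicts [l] = resolve_conflicts_alt [l] := by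
  simp [resolve_conflicts, resolve_conflicts_alt, pvFindA, PySem.List.enumerate,
    PySem.Set.contains, PySem.Set.empty, PySem.Dict.getD_modify_self]

-- ===== VERDICT (by name: the statement is the Claim_ definition above) =====
theorem resolve_conflicts_spec : Claim_equal_resolve_conflicts := by
  intro nl _ hpre
  unfold Spec_resolve_conflicts
  match nl, hpre with
  | [], _ => rfl
  | [l], _ => exact resolve_conflicts_single l
  | (a :: b :: t), hpre =>
      rcases hpre with h1 | h2
      case inl => simp at h1
      case inr => rw [resolve_conflicts_A_eq _ h2, resolve_conflicts_B_eq _ h2]
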